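-- pv_equiv track=rewrite | github.com/WashingtonYandun/DSA.py | Algo/leet_code/Easy/PowerOfFour.py | isPowerOfFour
-- ===== SOURCE A (Python) =====
-- def isPowerOfFour(n: int) -> bool:
--     """
--     Brute force algo for check if (n) is a power of 4
--
--     :param n: int
--     :return: If is a pwer of two or not: bool
--     """
--     power = 0
--     current = 0
--
--     while power < n:
--         power = 4 ** current
--         if power == n:
--             return True
--
--         current = current + 1
--
--     return False
-- ===== SOURCE B (Python) =====
-- def isPowerOfFour(n: int) -> bool:
--     # closed form: a positive n is a power of four iff raising four to half of
--     # (bit_length minus one) reproduces n exactly (one exponentiation, no loop)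
--     return n > 0 and 4 ** ((n.bit_length() - 1) // 2) == n
-- ===== Notes on version B (the rewrite author's own statement) =====
-- stated objective: alternative
-- what changed: replaces A's trial loop, which recomputes the power from scratch on every iteration, with a single closed-form exponentiation at exponent (bit_length minus one) floor-divided by two, compared against n
import Mathlib
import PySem

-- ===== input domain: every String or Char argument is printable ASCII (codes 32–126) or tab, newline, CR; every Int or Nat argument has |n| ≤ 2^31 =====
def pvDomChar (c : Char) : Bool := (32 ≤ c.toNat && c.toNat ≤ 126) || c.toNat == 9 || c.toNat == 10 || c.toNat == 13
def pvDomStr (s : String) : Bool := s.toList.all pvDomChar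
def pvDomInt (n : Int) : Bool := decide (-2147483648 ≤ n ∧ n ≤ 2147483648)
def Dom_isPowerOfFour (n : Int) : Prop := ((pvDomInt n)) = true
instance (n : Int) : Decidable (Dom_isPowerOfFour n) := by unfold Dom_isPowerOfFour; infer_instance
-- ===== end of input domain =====

-- B replaces A's trial loop (recomputing the power from scratch each round) with one
-- closed-form exponentiation at half the bit length, compared against n.


-- ===== PORT A =====
-- A's while loop, as fuel recursion (fuel n.toNat+1 is proved sufficient below;
-- the loop runs at most that many rounds, so the fuel guard never fires on true runs)
def pvLoopA (n : Int) (fuel : Nat) (power : Int) (current : Nat) : Bool :=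
  match fuel with
  | 0 => false
  | fuel + 1 =>
    if power < n then
      let p : Int := (4 : Int) ^ current
      if p = n then true
      else pvLoopA n fuel p (current + 1)
    else false

def isPowerOfFour (n : Int) : Bool := pvLoopA n (n.toNat + 1) 0 0

-- ===== PORT B =====
-- int.bit_length for nonnegative values (B only calls it on n > 0)
def pvBitLength (m : Nat) : Nat :=
  if m = 0 then 0 else pvBitLength (m / 2) + 1
decreasing_by exact Nat.div_lt_self (Nat.pos_of_ne_zero (by assumption)) (by omega)

def isPowerOfFour_alt (n : Int) : Bool :=
  decide (0 < n) && decide ((4 : Int) ^ ((pvBitLength n.toNat - 1) / 2) = n)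

-- ===== PRECONDITION & SPEC =====
def Spec_isPowerOfFour (n : Int) (out : Bool) : Prop := out = isPowerOfFour_alt n
instance (n : Int) (out : Bool) : Decidable (Spec_isPowerOfFour n out) := by unfold Spec_isPowerOfFour; infer_instance

-- ===== CLAIM (what is proved, stated in full; the proofs are below) =====
def Claim_equal_isPowerOfFour : Prop := ∀ (n : Int), Dom_isPowerOfFour n → Spec_isPowerOfFour n (isPowerOfFour n)

-- ===== LEMMAS AND PROOFS =====

-- A's loop soundness: if it returns true, n is a power of four
theorem pvLoopA_sound (n : Int) (fuel : Nat) :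
    ∀ power current, pvLoopA n fuel power current = true → ∃ k : Nat, (4 : Int) ^ k = n := by
  induction fuel with
  | zero => intro power current h; simp [pvLoopA] at h
  | succ fuel ih =>
    intro power current h
    by_cases hlt : power < n
    · by_cases heq : (4 : Int) ^ current = n
      · exact ⟨current, heq⟩
      · simp only [pvLoopA, hlt, if_true, heq, if_false] at h
        exact ih _ _ h
    · simp [pvLoopA, hlt] at h

-- A's loop completeness: with the invariant power < 4^current and enough fuel,
-- a power of four is found
theorem pvLoopA_complete (n : Int) (k : Nat) (hk : (4 : Int) ^ k = n) :
    ∀ fuel current power, power < (4 : Int) ^ current → current ≤ k →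
      k + 1 - current ≤ fuel → pvLoopA n fuel power current = true := by
  intro fuel
  induction fuel with
  | zero => intro current power _ hle hfuel; omega
  | succ fuel ih =>
    intro current power hpow hle hfuel
    have hmono : (4 : Int) ^ current ≤ (4 : Int) ^ k :=
      pow_le_pow_right₀ (by norm_num) hle
    have hlt : power < n := by rw [← hk]; exact lt_of_lt_of_le hpow hmono
    by_cases heq : (4 : Int) ^ current = n
    · simp [pvLoopA, hlt, heq]
    · have hcur : current < k := by
        rcases Nat.lt_or_ge current k with h | h
        · exact h
        · exact absurd (by rw [Nat.le_antisymm hle h]; exact hk) heq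
      simp only [pvLoopA, hlt, if_true, heq, if_false]
      refine ih (current + 1) ((4 : Int) ^ current) ?_ (by omega) (by omega)
      have := pow_lt_pow_right₀ (a := (4 : Int)) (by norm_num) (Nat.lt_succ_self current)
      simpa using this

theorem nat_lt_four_pow (k : Nat) : k < 4 ^ k :=
  lt_of_lt_of_le (Nat.lt_two_pow_self) (Nat.pow_le_pow_left (by norm_num) k)

theorem isPowerOfFour_iff (n : Int) :
    isPowerOfFour n = true ↔ ∃ k : Nat, (4 : Int) ^ k = n := by
  constructor
  · exact pvLoopA_sound n _ 0 0
  · rintro ⟨k, hk⟩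
    have hnpos : 0 < n := by rw [← hk]; positivity
    have hnk : (k : Int) < n := by
      rw [← hk]
      exact_mod_cast Int.ofNat_lt.mpr (nat_lt_four_pow k)
    have hkle : k ≤ n.toNat := by omega
    exact pvLoopA_complete n k hk (n.toNat + 1) 0 0 (by norm_num) (Nat.zero_le k) (by omega)

theorem pvBitLength_two_pow (j : Nat) : pvBitLength (2 ^ j) = j + 1 := by
  induction j with
  | zero => simp [pvBitLength]
  | succ j ih =>
    rw [pvBitLength]
    have h2 : 2 ^ (j + 1) ≠ 0 := by positivity
    simp only [h2, if_false]
    have : 2 ^ (j + 1) / 2 = 2 ^ j := by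
      rw [pow_succ]; omega
    rw [this, ih]

theorem isPowerOfFour_alt_iff (n : Int) :
    isPowerOfFour_alt n = true ↔ ∃ k : Nat, (4 : Int) ^ k = n := by
  unfold isPowerOfFour_alt
  simp only [Bool.and_eq_true, decide_eq_true_eq]
  constructor
  · rintro ⟨-, h⟩; exact ⟨_, h⟩
  · rintro ⟨k, hk⟩
    have hnpos : 0 < n := by rw [← hk]; positivity
    refine ⟨hnpos, ?_⟩
    have htn : n.toNat = 4 ^ k := by
      have : ((4 ^ k : Nat) : Int) = n := by push_cast; exact hk
      omega
    have h4 : (4 : Nat) ^ k = 2 ^ (2 * k) := by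
      rw [pow_mul]; norm_num
    have hbl : pvBitLength n.toNat = 2 * k + 1 := by
      rw [htn, h4, pvBitLength_two_pow]
    rw [hbl]
    have : (2 * k + 1 - 1) / 2 = k := by omega
    rw [this, hk]

-- ===== VERDICT (by name: the statement is the Claim_ definition above) =====
theorem isPowerOfFour_spec : Claim_equal_isPowerOfFour := by
  intro n _
  unfold Spec_isPowerOfFour
  by_cases h : ∃ k : Nat, (4 : Int) ^ k = n
  · rw [(isPowerOfFour_iff n).mpr h, (isPowerOfFour_alt_iff n).mpr h]
  · rw [Bool.eq_false_iff.mpr (fun hc => h ((isPowerOfFour_iff n).mp hc)),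
        Bool.eq_false_iff.mpr (fun hc => h ((isPowerOfFour_alt_iff n).mp hc))]
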